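-- pv_equiv track=rewrite | github.com/NR7KINGithub/Data_Structures | 1/1993_Operations_On_Tree.py | run_operations
-- ===== SOURCE A (Python) =====
-- from typing import List
--
-- class LockingTree:
--     def __init__(self, parent: List[int]):
--         n = len(parent)
--         self.parent = parent
--         self.children = [[] for _ in range(n)]
--         for i, p in enumerate(parent):
--             if p != -1:
--                 self.children[p].append(i)
--         self.locked = [-1] * n
--
--     def lock(self, num: int, user: int) -> bool:
--         if self.locked[num] != -1:
--             return False
--         self.locked[num] = user
--         return True
--
--     def unlock(self, num: int, user: int) -> bool:
--         if self.locked[num] != user: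
--             return False
--         self.locked[num] = -1
--         return True
--
--     def upgrade(self, num: int, user: int) -> bool:
--         if self.locked[num] != -1:
--             return False
--         cur = num
--         while cur != -1:
--             if self.locked[cur] != -1:
--                 return False
--             cur = self.parent[cur]
--         stack = [num]
--         found = []
--         while stack:
--             node = stack.pop()
--             if self.locked[node] != -1:
--                 found.append(node)
--             stack.extend(self.children[node])
--         if not found:
--             return False
--         for node in found:
--             self.locked[node] = -1
--         self.locked[num] = user
--         return True
--
-- def run_operations(parent: List[int], ops: List[str], args: List[List[int]]) -> List:
--     tree = None
--     results = []
--     for i, op in enumerate(ops):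
--         if op == "LockingTree":
--             tree = LockingTree(parent)
--             results.append(None)
--         elif op == "lock":
--             res = tree.lock(args[i][0], args[i][1])
--             results.append(res)
--         elif op == "unlock":
--             res = tree.unlock(args[i][0], args[i][1])
--             results.append(res)
--         elif op == "upgrade":
--             res = tree.upgrade(args[i][0], args[i][1])
--             results.append(res)
--     return results
-- ===== SOURCE B (Python) =====
-- from typing import List
--
-- # B: no LockingTree class and no two-phase subtree handling.  The state is two plain
-- # lists; upgrade clears locks during a single breadth-first sweep over the subtree
-- # (a queue read by cursor), tracking with one boolean whether any lock was cleared,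
-- # instead of A's DFS stack that first collects a 'found' list and then clears it in
-- # a second loop.
--
-- def run_operations(parent: List[int], ops: List[str], args: List[List[int]]) -> List:
--     children = None
--     locked = None
--     results = []
--     for i, op in enumerate(ops):
--         if op == "LockingTree":
--             children = [[] for _ in range(len(parent))]
--             for v, p in enumerate(parent):
--                 if p != -1:
--                     children[p].append(v)
--             locked = [-1] * len(parent)
--             results.append(None)
--         elif op == "lock":
--             num, user = args[i][0], args[i][1]
--             if locked[num] != -1:
--                 results.append(False)
--             else:
--                 locked[num] = user
--                 results.append(True)
--         elif op == "unlock":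
--             num, user = args[i][0], args[i][1]
--             if locked[num] != user:
--                 results.append(False)
--             else:
--                 locked[num] = -1
--                 results.append(True)
--         elif op == "upgrade":
--             num, user = args[i][0], args[i][1]
--             if locked[num] != -1:
--                 results.append(False)
--                 continue
--             cur, blocked = num, False
--             while cur != -1:
--                 if locked[cur] != -1:
--                     blocked = True
--                     break
--                 cur = parent[cur]
--             if blocked:
--                 results.append(False)
--                 continue
--             queue = [num]
--             qi = 0
--             cleared = False
--             while qi < len(queue):
--                 v = queue[qi]
--                 qi += 1
--                 if locked[v] != -1:
--                     locked[v] = -1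
--                     cleared = True
--                 queue.extend(children[v])
--             if cleared:
--                 locked[num] = user
--                 results.append(True)
--             else:
--                 results.append(False)
--     return results
-- ===== Notes on version B (the rewrite author's own statement) =====
-- stated objective: alternative
-- what changed: B drops the LockingTree class and replaces A's two-phase upgrade subtree handling (DFS stack that first accumulates a 'found' list of locked descendants, then a second loop that clears them) with a single breadth-first sweep over a cursor-read queue that clears each lock as it is met and tracks one boolean; lock/unlock become inline updates of a plain list.
import Mathlib
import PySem

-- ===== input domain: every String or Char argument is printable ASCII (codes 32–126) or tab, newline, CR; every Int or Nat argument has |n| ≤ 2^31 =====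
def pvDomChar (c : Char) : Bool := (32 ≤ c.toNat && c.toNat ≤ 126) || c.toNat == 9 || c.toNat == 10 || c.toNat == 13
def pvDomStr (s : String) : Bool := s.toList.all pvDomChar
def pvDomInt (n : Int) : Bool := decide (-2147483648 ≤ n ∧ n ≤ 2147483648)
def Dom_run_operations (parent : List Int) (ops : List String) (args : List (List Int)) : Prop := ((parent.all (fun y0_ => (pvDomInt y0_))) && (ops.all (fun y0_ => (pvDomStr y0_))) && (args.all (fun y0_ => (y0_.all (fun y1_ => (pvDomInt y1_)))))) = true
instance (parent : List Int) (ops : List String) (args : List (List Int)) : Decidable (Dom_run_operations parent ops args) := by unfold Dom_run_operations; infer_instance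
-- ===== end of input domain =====

-- B replaces A's two-phase upgrade subtree handling (DFS stack collecting a found
-- list, then a separate clearing loop) by one breadth-first sweep that clears locks
-- as it meets them; an 'alternative' decomposition of the same simulation.
-- Equivalence is about the RETURN value only (each Python mutates only its own
-- internal per-call state).

-- ===== PORT A =====
-- list indexing xs[i] is PySem.List.pyGetD / pySetD (Python semantics, incl. negative
-- wraparound); under Pre_ every index A dereferences is in range, where they are exact.

-- LockingTree.__init__: children[p].append(i) for each (i, p) in enumerate(parent) with p != -1
def pvChildrenA (parent : List Int) : List (List Int) :=
  (PySem.List.enumerate parent 0).foldl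
    (fun cs ip =>
      if ip.2 ≠ -1 then
        PySem.List.pySetD cs ip.2 ((PySem.List.pyGetD cs ip.2 []) ++ [ip.1])
      else cs)
    (List.replicate parent.length [])

def pvLockA (locked : List Int) (num user : Int) : Bool × List Int :=
  if PySem.List.pyGetD locked num 0 ≠ -1 then (false, locked)
  else (true, PySem.List.pySetD locked num user)

def pvUnlockA (locked : List Int) (num user : Int) : Bool × List Int :=
  if PySem.List.pyGetD locked num 0 ≠ user then (false, locked)
  else (true, PySem.List.pySetD locked num (-1))

-- the 'while cur != -1' ancestor loop of A.upgrade (true = some locked ancestor found);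
-- fuel: under Pre_ (acyclic parent map) the walk reaches -1 within parent.length + 1 steps
def pvWalkA (parent locked : List Int) : Nat → Int → Bool
  | 0, _ => true
  | f+1, cur =>
    if cur = -1 then false
    else if PySem.List.pyGetD locked cur 0 ≠ -1 then true
    else pvWalkA parent locked f (PySem.List.pyGetD parent cur 0)

-- the 'while stack' loop of A.upgrade; a Lean list whose HEAD is the top of the Python
-- stack: 'stack.pop()' = take the head, 'stack.extend(children[node])' = push the
-- children reversed at the head.  fuel: under Pre_ the number of iterations is bounded
-- by the measure sum of (n+1)^(n - depth v) over the stack, at most (n+1)^(n+1).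
def pvDfsA (children : List (List Int)) (locked : List Int) : Nat → List Int → List Int → List Int
  | 0, _, found => found
  | _+1, [], found => found
  | f+1, node :: rest, found =>
    pvDfsA children locked f ((PySem.List.pyGetD children node []).reverse ++ rest)
      (if PySem.List.pyGetD locked node 0 ≠ -1 then found ++ [node] else found)

def pvUpgradeA (parent : List Int) (children : List (List Int)) (locked : List Int) (num user : Int) : Bool × List Int :=
  if PySem.List.pyGetD locked num 0 ≠ -1 then (false, locked)
  else if pvWalkA parent locked (parent.length + 2) num then (false, locked)
  else
    let found := pvDfsA children locked ((parent.length + 1) ^ (parent.length + 1) + 1) [num] []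
    if found = [] then (false, locked)
    else
      (true, PySem.List.pySetD (found.foldl (fun l nd => PySem.List.pySetD l nd (-1)) locked) num user)

def pvLoopA (parent : List Int) (args : List (List Int)) :
    List (Int × String) → Option (List (List Int) × List Int) → List (Option Bool) → List (Option Bool)
  | [], _, results => results
  | (i, op) :: rest, st, results =>
    if op = "LockingTree" then
      pvLoopA parent args rest (some (pvChildrenA parent, List.replicate parent.length (-1))) (results ++ [none])
    else if op = "lock" then
      let t := st.getD ([], [])
      let a := PySem.List.pyGetD args i []
      let r := pvLockA t.2 (PySem.List.pyGetD a 0 0) (PySem.List.pyGetD a 1 0)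
      pvLoopA parent args rest (some (t.1, r.2)) (results ++ [some r.1])
    else if op = "unlock" then
      let t := st.getD ([], [])
      let a := PySem.List.pyGetD args i []
      let r := pvUnlockA t.2 (PySem.List.pyGetD a 0 0) (PySem.List.pyGetD a 1 0)
      pvLoopA parent args rest (some (t.1, r.2)) (results ++ [some r.1])
    else if op = "upgrade" then
      let t := st.getD ([], [])
      let a := PySem.List.pyGetD args i []
      let r := pvUpgradeA parent t.1 t.2 (PySem.List.pyGetD a 0 0) (PySem.List.pyGetD a 1 0)
      pvLoopA parent args rest (some (t.1, r.2)) (results ++ [some r.1])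
    else pvLoopA parent args rest st results

def run_operations (parent : List Int) (ops : List String) (args : List (List Int)) : List (Option Bool) :=
  pvLoopA parent args (PySem.List.enumerate ops 0) none []

-- ===== PORT B =====

-- B keeps A's constructor and ancestor loop verbatim, so its port reuses
-- pvChildrenA and pvWalkA; everything after the walk is B's own fused sweep.

-- B's fused breadth-first sweep: the queue read by cursor qi is represented by its
-- unread suffix (head = queue[qi]); 'queue.extend(children[v])' appends at the END.
-- Clears each lock as it is met and tracks the 'cleared' boolean; same fuel bound as A's DFS.
def pvBfsB (children : List (List Int)) : Nat → List Int → List Int → Bool → Bool × List Int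
  | 0, _, locked, cleared => (cleared, locked)
  | _+1, [], locked, cleared => (cleared, locked)
  | f+1, v :: rest, locked, cleared =>
    if PySem.List.pyGetD locked v 0 ≠ -1 then
      pvBfsB children f (rest ++ PySem.List.pyGetD children v []) (PySem.List.pySetD locked v (-1)) true
    else
      pvBfsB children f (rest ++ PySem.List.pyGetD children v []) locked cleared

def pvLoopB (parent : List Int) (args : List (List Int)) :
    List (Int × String) → Option (List (List Int) × List Int) → List (Option Bool) → List (Option Bool)
  | [], _, results => results
  | (i, op) :: rest, st, results =>
    if op = "LockingTree" then
      pvLoopB parent args rest (some (pvChildrenA parent, List.replicate parent.length (-1))) (results ++ [none])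
    else if op = "lock" then
      let t := st.getD ([], [])
      let a := PySem.List.pyGetD args i []
      let num := PySem.List.pyGetD a 0 0
      if PySem.List.pyGetD t.2 num 0 ≠ -1 then
        pvLoopB parent args rest (some t) (results ++ [some false])
      else
        pvLoopB parent args rest (some (t.1, PySem.List.pySetD t.2 num (PySem.List.pyGetD a 1 0))) (results ++ [some true])
    else if op = "unlock" then
      let t := st.getD ([], [])
      let a := PySem.List.pyGetD args i []
      let num := PySem.List.pyGetD a 0 0
      if PySem.List.pyGetD t.2 num 0 ≠ PySem.List.pyGetD a 1 0 then
        pvLoopB parent args rest (some t) (results ++ [some false])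
      else
        pvLoopB parent args rest (some (t.1, PySem.List.pySetD t.2 num (-1))) (results ++ [some true])
    else if op = "upgrade" then
      let t := st.getD ([], [])
      let a := PySem.List.pyGetD args i []
      let num := PySem.List.pyGetD a 0 0
      if PySem.List.pyGetD t.2 num 0 ≠ -1 then
        pvLoopB parent args rest (some t) (results ++ [some false])
      else if pvWalkA parent t.2 (parent.length + 2) num then
        pvLoopB parent args rest (some t) (results ++ [some false])
      else
        let r := pvBfsB t.1 ((parent.length + 1) ^ (parent.length + 1) + 1) [num] t.2 false
        if r.1 then
          pvLoopB parent args rest (some (t.1, PySem.List.pySetD r.2 num (PySem.List.pyGetD a 1 0))) (results ++ [some true])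
        else
          pvLoopB parent args rest (some (t.1, r.2)) (results ++ [some false])
    else pvLoopB parent args rest st results

def run_operations_alt (parent : List Int) (ops : List String) (args : List (List Int)) : List (Option Bool) :=
  pvLoopB parent args (PySem.List.enumerate ops 0) none []

-- ===== PRECONDITION & SPEC =====

-- the parent map as Python's upgrade walks it: -1 is the root sentinel, any other
-- index is dereferenced by Python list indexing (with negative wraparound)
def pvEp (parent : List Int) (c : Int) : Int :=
  if c = -1 then -1 else PySem.List.pyGetD parent c 0

def pvEpIter (parent : List Int) : Nat → Int → Int
  | 0, c => c
  | d+1, c => pvEpIter parent d (pvEp parent c)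

-- acyclicity of the parent map: from every node, following parent pointers reaches
-- the root sentinel -1 within parent.length steps (on a cyclic map A's ancestor walk
-- and subtree traversal diverge)
def pvAcyclic (parent : List Int) : Prop :=
  ∀ k < parent.length, pvEpIter parent parent.length ((k : Nat) : Int) = -1

-- Pre_ excludes exactly the inputs on which A raises (a lock/unlock/upgrade op before any
-- "LockingTree", a missing or short argument list, a node index or parent entry outside
-- [-n, n), i.e. IndexError) or diverges (ops contain an upgrade while the parent map has
-- a cycle; A's walk diverges there unless the upgrade early-returns, so this clause is
-- slightly wider than the divergent set).
def Pre_run_operations (parent : List Int) (ops : List String) (args : List (List Int)) : Prop :=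
  ("LockingTree" ∈ ops →
    ∀ k < parent.length, -(parent.length : Int) ≤ parent.getD k 0 ∧ parent.getD k 0 < (parent.length : Int)) ∧
  ((∃ i < ops.length, ops.getD i "" = "upgrade") → pvAcyclic parent) ∧
  (∀ i < ops.length, (ops.getD i "" = "lock" ∨ ops.getD i "" = "unlock" ∨ ops.getD i "" = "upgrade") →
    (∃ j < i, ops.getD j "" = "LockingTree") ∧ i < args.length ∧
    2 ≤ (args.getD i []).length ∧
    -(parent.length : Int) ≤ (args.getD i []).getD 0 0 ∧
    (args.getD i []).getD 0 0 < (parent.length : Int))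

instance (parent : List Int) (ops : List String) (args : List (List Int)) : Decidable (Pre_run_operations parent ops args) := by
  unfold Pre_run_operations pvAcyclic; infer_instance

def pvWitness_run_operations : List Int × List String × List (List Int) :=
  ([-1, 0], ["LockingTree", "lock", "upgrade"], [[], [1, 7], [0, 3]])

def Spec_run_operations (parent : List Int) (ops : List String) (args : List (List Int)) (out : List (Option Bool)) : Prop := out = run_operations_alt parent ops args
instance (parent : List Int) (ops : List String) (args : List (List Int)) (out : List (Option Bool)) : Decidable (Spec_run_operations parent ops args out) := by unfold Spec_run_operations; infer_instance

-- ===== CLAIM (what is proved, stated in full; the proofs are below) =====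
def Claim_equal_run_operations : Prop := ∀ (parent : List Int) (ops : List String) (args : List (List Int)), Dom_run_operations parent ops args → Pre_run_operations parent ops args → Spec_run_operations parent ops args (run_operations parent ops args)

-- ===== LEMMAS AND PROOFS =====

-- Python's wrapped index as a Nat, for indices in [-n, n)
def pvW (n : Nat) (i : Int) : Nat := if 0 ≤ i then i.toNat else n - (-i).toNat

-- depth of a node: steps of the parent map to reach -1 (computed with fuel)
def pvDepthA (parent : List Int) : Nat → Int → Nat
  | 0, _ => 0
  | f+1, c => if c = -1 then 0 else pvDepthA parent f (pvEp parent c) + 1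

-- depN k = depth of node k with enough fuel
def pvDepN (parent : List Int) (k : Nat) : Nat := pvDepthA parent (parent.length + 1) ((k : Nat) : Int)

theorem pvW_lt (n : Nat) (i : Int) (h1 : -(n : Int) ≤ i) (h2 : i < n) : pvW n i < n := by
  unfold pvW; split <;> omega


theorem pvW_of_nonneg (n : Nat) (i : Int) (h : 0 ≤ i) : pvW n i = i.toNat := by
  unfold pvW; simp [h]

theorem pyGetD_wrap {α : Type} (xs : List α) (i : Int) (d : α)
    (h1 : -(xs.length : Int) ≤ i) (h2 : i < xs.length) :
    PySem.List.pyGetD xs i d = xs.getD (pvW xs.length i) d := by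
  simp only [PySem.List.pyGetD, PySem.List.pyGet?, PySem.List.pyIdx?, pvW]
  split_ifs with h0
  · simp [List.getD_eq_getElem?_getD]
  · simp [List.getD_eq_getElem?_getD]

theorem pySetD_wrap {α : Type} (xs : List α) (i : Int) (v : α)
    (h1 : -(xs.length : Int) ≤ i) (h2 : i < xs.length) :
    PySem.List.pySetD xs i v = xs.set (pvW xs.length i) v := by
  simp only [PySem.List.pySetD, PySem.List.pySet?, PySem.List.pyIdx?, pvW]
  split_ifs with h0
  · simp
  · simp

theorem pyGetD_out {α : Type} (xs : List α) (i : Int) (d : α)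
    (h : ¬ (-(xs.length : Int) ≤ i ∧ i < xs.length)) :
    PySem.List.pyGetD xs i d = d := by
  simp only [PySem.List.pyGetD, PySem.List.pyGet?, PySem.List.pyIdx?]
  split_ifs with h0 hlt hge
  · omega
  · rfl
  · omega
  · rfl

theorem getD_set_general {α : Type} (l : List α) (a k : Nat) (x d : α) (ha : a < l.length) :
    (l.set a x).getD k d = if a = k then x else l.getD k d := by
  simp only [List.getD_eq_getElem?_getD, List.getElem?_set, ha, if_true]
  split <;> simp

-- ---- characterisation of the children lists ----

theorem childFold_length : ∀ (l : List (Int × Int)) (cs : List (List Int)),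
    (l.foldl (fun cs ip =>
      if ip.2 ≠ -1 then
        PySem.List.pySetD cs ip.2 ((PySem.List.pyGetD cs ip.2 []) ++ [ip.1])
      else cs) cs).length = cs.length := by
  intro l
  induction l with
  | nil => intro cs; rfl
  | cons q t ih =>
    intro cs
    simp only [List.foldl_cons]
    split
    · rw [ih, PySem.List.length_pySetD]
    · rw [ih]

theorem length_pvChildrenA (parent : List Int) : (pvChildrenA parent).length = parent.length := by
  unfold pvChildrenA; rw [childFold_length]; simp

theorem childFold_getD (n : Nat) : ∀ (l : List (Int × Int)) (cs : List (List Int)), cs.length = n →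
    (∀ q ∈ l, q.2 = -1 ∨ (-(n : Int) ≤ q.2 ∧ q.2 < n)) →
    ∀ p : Nat,
    ((l.foldl (fun cs ip =>
      if ip.2 ≠ -1 then
        PySem.List.pySetD cs ip.2 ((PySem.List.pyGetD cs ip.2 []) ++ [ip.1])
      else cs) cs)).getD p [] =
      cs.getD p [] ++ (l.filter (fun q => q.2 != -1 && (pvW n q.2 == p))).map (·.1) := by
  intro l
  induction l with
  | nil => intro cs _ _ p; simp
  | cons q t ih =>
    intro cs hn hq p
    subst hn
    simp only [List.foldl_cons]
    by_cases he : q.2 = -1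
    · rw [if_neg (by simp [he])]
      rw [ih cs rfl (fun r hr => hq r (List.mem_cons_of_mem _ hr)) p]
      have hb : (q.2 != -1 && (pvW cs.length q.2 == p)) = false := by simp [he]
      simp [hb]
    · obtain ⟨hv1, hv2⟩ := (hq q List.mem_cons_self).resolve_left he
      rw [if_pos he]
      rw [pySetD_wrap cs q.2 _ hv1 hv2, pyGetD_wrap cs q.2 _ hv1 hv2]
      have hwlt : pvW cs.length q.2 < cs.length := pvW_lt _ _ hv1 hv2
      have hlen' : (cs.set (pvW cs.length q.2) (cs.getD (pvW cs.length q.2) [] ++ [q.1])).length = cs.length := by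
        simp
      rw [ih (cs.set (pvW cs.length q.2) (cs.getD (pvW cs.length q.2) [] ++ [q.1])) hlen'
        (fun r hr => hq r (List.mem_cons_of_mem _ hr)) p]
      rw [getD_set_general _ _ _ _ _ hwlt]
      by_cases hpq : pvW cs.length q.2 = p
      · have hb : (q.2 != -1 && (pvW cs.length q.2 == p)) = true := by simp [he, hpq]
        simp [hpq, he]
      · have hb : (q.2 != -1 && (pvW cs.length q.2 == p)) = false := by simp [hpq]
        simp [hb, hpq]

theorem pvChildrenA_getD (parent : List Int)
    (hP : ∀ k < parent.length, -(parent.length : Int) ≤ parent.getD k 0 ∧ parent.getD k 0 < (parent.length : Int))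
    (p : Nat) :
    (pvChildrenA parent).getD p [] =
    (PySem.List.pyRange 0 (parent.length : Int) 1).filter
      (fun j => PySem.List.pyGetD parent j 0 != -1 && (pvW parent.length (PySem.List.pyGetD parent j 0) == p)) := by
  unfold pvChildrenA
  rw [childFold_getD parent.length (PySem.List.enumerate parent 0) (List.replicate parent.length [])
    (by simp)
    (by
      intro q hq
      rw [PySem.List.mem_enumerate_iff] at hq
      obtain ⟨k, hk, rfl⟩ := hq
      have := hP k hk
      rw [List.getD_eq_getElem parent 0 hk] at this
      by_cases h : parent[k] = -1
      · exact Or.inl h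
      · exact Or.inr this) p]
  have hrep : (List.replicate parent.length ([] : List Int)).getD p [] = [] := by
    simp only [List.getD_eq_getElem?_getD, List.getElem?_replicate]
    split <;> rfl
  rw [hrep, List.nil_append]
  rw [PySem.List.enumerate_eq_map_pyRange parent 0]
  rw [List.filter_map, List.map_map]
  simp only [Function.comp_def]
  rw [List.map_id', PySem.List.len_eq]

theorem mem_childrenA (parent : List Int)
    (hP : ∀ k < parent.length, -(parent.length : Int) ≤ parent.getD k 0 ∧ parent.getD k 0 < (parent.length : Int))
    (p : Nat) (x : Int) :
    x ∈ (pvChildrenA parent).getD p [] ↔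
      (0 ≤ x ∧ x < (parent.length : Int)) ∧ PySem.List.pyGetD parent x 0 ≠ -1 ∧
        pvW parent.length (PySem.List.pyGetD parent x 0) = p := by
  rw [pvChildrenA_getD parent hP p]
  simp [List.mem_filter, PySem.List.mem_pyRange_one, and_assoc]


theorem mem_pyGetD_children (parent : List Int)
    (hP : ∀ k < parent.length, -(parent.length : Int) ≤ parent.getD k 0 ∧ parent.getD k 0 < (parent.length : Int))
    (b x : Int) (hx : x ∈ PySem.List.pyGetD (pvChildrenA parent) b []) :
    (0 ≤ x ∧ x < (parent.length : Int)) ∧ PySem.List.pyGetD parent x 0 ≠ -1 ∧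
      pvW parent.length (PySem.List.pyGetD parent x 0) = pvW parent.length b ∧
      (-(parent.length : Int) ≤ b ∧ b < (parent.length : Int)) := by
  have hlen := length_pvChildrenA parent
  by_cases hb : -(parent.length : Int) ≤ b ∧ b < (parent.length : Int)
  · rw [pyGetD_wrap _ _ _ (by rw [hlen]; exact hb.1) (by rw [hlen]; exact_mod_cast hb.2)] at hx
    rw [hlen] at hx
    obtain ⟨hxb, hxe, hxw⟩ := (mem_childrenA parent hP (pvW parent.length b) x).1 hx
    exact ⟨hxb, hxe, hxw, hb⟩
  · rw [pyGetD_out _ _ _ (by rw [hlen]; exact_mod_cast hb)] at hx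
    cases hx

-- ---- depth of a node under acyclicity ----


theorem pvEp_wrap (parent : List Int) (c : Int) (hc : c ≠ -1)
    (h1 : -(parent.length : Int) ≤ c) (h2 : c < parent.length) :
    pvEp parent c = pvEp parent ((pvW parent.length c : Nat) : Int) := by
  unfold pvEp
  rw [if_neg hc, if_neg (by omega : ¬((pvW parent.length c : Nat) : Int) = -1)]
  rw [pyGetD_wrap parent c 0 h1 h2, PySem.List.pyGetD_natCast]


theorem pvDepthA_congr (parent : List Int) :
    ∀ (d : Nat) (c : Int), pvEpIter parent d c = -1 →
    ∀ (f f' : Nat), d ≤ f → d ≤ f' → pvDepthA parent f c = pvDepthA parent f' c := by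
  intro d
  induction d with
  | zero =>
    intro c h f f' _ _
    have hc : c = -1 := h
    subst hc
    cases f <;> cases f' <;> simp [pvDepthA]
  | succ d ih =>
    intro c h f f' hf hf'
    by_cases hc : c = -1
    · subst hc; cases f <;> cases f' <;> simp [pvDepthA]
    · obtain ⟨g, rfl⟩ : ∃ g, f = g + 1 := ⟨f - 1, by omega⟩
      obtain ⟨g', rfl⟩ : ∃ g', f' = g' + 1 := ⟨f' - 1, by omega⟩
      simp only [pvDepthA, if_neg hc]
      rw [ih (pvEp parent c) h g g' (by omega) (by omega)]

theorem pvDepthA_le (parent : List Int) :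
    ∀ (d : Nat) (c : Int), pvEpIter parent d c = -1 →
    ∀ (f : Nat), d ≤ f → pvDepthA parent f c ≤ d := by
  intro d
  induction d with
  | zero =>
    intro c h f _
    have hc : c = -1 := h
    subst hc
    cases f <;> simp [pvDepthA]
  | succ d ih =>
    intro c h f hf
    by_cases hc : c = -1
    · subst hc; cases f <;> simp [pvDepthA]
    · obtain ⟨g, rfl⟩ : ∃ g, f = g + 1 := ⟨f - 1, by omega⟩
      simp only [pvDepthA, if_neg hc]
      have := ih (pvEp parent c) h g (by omega)
      omega

theorem pvDepN_le (parent : List Int) (hAc : pvAcyclic parent) (k : Nat) (hk : k < parent.length) :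
    pvDepN parent k ≤ parent.length := by
  exact pvDepthA_le parent parent.length _ (hAc k hk) _ (by omega)

theorem pvDepthA_wrap (parent : List Int) (x : Int) (hx : x ≠ -1)
    (h1 : -(parent.length : Int) ≤ x) (h2 : x < parent.length) (f : Nat) (hf : 1 ≤ f) :
    pvDepthA parent f x = pvDepthA parent f ((pvW parent.length x : Nat) : Int) := by
  obtain ⟨g, rfl⟩ : ∃ g, f = g + 1 := ⟨f - 1, by omega⟩
  simp only [pvDepthA, if_neg hx,
    if_neg (by omega : ¬((pvW parent.length x : Nat) : Int) = -1)]
  rw [← pvEp_wrap parent x hx h1 h2]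

-- a child is one level deeper than the (wrapped) node it hangs from
theorem child_depth (parent : List Int)
    (hP : ∀ k < parent.length, -(parent.length : Int) ≤ parent.getD k 0 ∧ parent.getD k 0 < (parent.length : Int))
    (hAc : pvAcyclic parent) (v c : Int)
    (hv1 : -(parent.length : Int) ≤ v) (hv2 : v < parent.length)
    (hc : c ∈ PySem.List.pyGetD (pvChildrenA parent) v []) :
    pvDepN parent (pvW parent.length c) = pvDepN parent (pvW parent.length v) + 1 := by
  obtain ⟨⟨hc0, hcn⟩, hce, hcw, _⟩ := mem_pyGetD_children parent hP v c hc
  have hn1 : 1 ≤ parent.length := by omega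
  have hwc : pvW parent.length c = c.toNat := pvW_of_nonneg _ _ hc0
  have hcast : ((c.toNat : Nat) : Int) = c := Int.toNat_of_nonneg hc0
  have hcne : c ≠ -1 := by omega
  unfold pvDepN
  rw [hwc, hcast]
  obtain ⟨m, hm⟩ : ∃ m, parent.length = m + 1 := ⟨parent.length - 1, by omega⟩
  have hstep : pvDepthA parent (parent.length + 1) c
      = pvDepthA parent parent.length (pvEp parent c) + 1 := by
    rw [hm]; simp only [pvDepthA, if_neg hcne]
  rw [hstep]
  -- the parent entry of c
  have hEp : pvEp parent c = PySem.List.pyGetD parent c 0 := by unfold pvEp; rw [if_neg hcne]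
  have heg : PySem.List.pyGetD parent c 0 = parent.getD c.toNat 0 := by
    rw [pyGetD_wrap parent c 0 (by omega) hcn, hwc]
  have hev := hP c.toNat (by omega)
  rw [← heg] at hev
  -- rewrite the entry through its wrapped form
  have hwrap : pvDepthA parent parent.length (pvEp parent c)
      = pvDepthA parent parent.length ((pvW parent.length (PySem.List.pyGetD parent c 0) : Nat) : Int) := by
    rw [hEp]
    exact pvDepthA_wrap parent _ hce hev.1 hev.2 parent.length hn1
  rw [hwrap, hcw]
  -- bump the fuel from parent.length to parent.length + 1
  have hterm := hAc (pvW parent.length v) (pvW_lt _ _ hv1 (by exact_mod_cast hv2))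
  rw [pvDepthA_congr parent parent.length _ hterm parent.length (parent.length + 1) (by omega) (by omega)]

-- ---- the measure that bounds both traversals ----

theorem measure_children (parent : List Int)
    (hP : ∀ k < parent.length, -(parent.length : Int) ≤ parent.getD k 0 ∧ parent.getD k 0 < (parent.length : Int))
    (hAc : pvAcyclic parent) (v : Int)
    (hv1 : -(parent.length : Int) ≤ v) (hv2 : v < parent.length) :
    ((PySem.List.pyGetD (pvChildrenA parent) v []).map
      (fun c => (parent.length + 1) ^ (parent.length - pvDepN parent (pvW parent.length c)))).sum + 1 ≤
    (parent.length + 1) ^ (parent.length - pvDepN parent (pvW parent.length v)) := by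
  have hwv : pvW parent.length v < parent.length := pvW_lt _ _ hv1 (by exact_mod_cast hv2)
  set n := parent.length with hn
  set d := pvDepN parent (pvW n v) with hd
  have hdn : d ≤ n := pvDepN_le parent hAc _ hwv
  set C := PySem.List.pyGetD (pvChildrenA parent) v [] with hC
  have hall : ∀ c ∈ C, (n + 1) ^ (n - pvDepN parent (pvW n c)) = (n + 1) ^ (n - (d + 1)) := by
    intro c hc
    rw [child_depth parent hP hAc v c hv1 hv2 hc]
  rw [List.map_congr_left hall]
  have hsum : (C.map (fun _ => (n + 1) ^ (n - (d + 1)))).sum = C.length * (n + 1) ^ (n - (d + 1)) := by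
    simp [mul_comm]
  rw [hsum]
  by_cases hdeq : d = n
  · have hCnil : C = [] := by
      rw [List.eq_nil_iff_forall_not_mem]
      intro c hc
      have h1 := child_depth parent hP hAc v c hv1 hv2 hc
      simp only [← hn] at h1
      have hc0 := (mem_pyGetD_children parent hP v c hc).1
      have hwcn : pvW n c < n := pvW_lt _ _ (by omega) (by exact_mod_cast hc0.2)
      have := pvDepN_le parent hAc _ hwcn
      omega
    rw [hCnil]
    simp [hdeq]
  · -- C has at most n elements
    have hClen : C.length ≤ n := by
      rw [hC, pyGetD_wrap _ _ _ (by rw [length_pvChildrenA]; exact hv1)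
        (by rw [length_pvChildrenA]; exact_mod_cast hv2)]
      rw [length_pvChildrenA]
      rw [pvChildrenA_getD parent hP]
      calc ((PySem.List.pyRange 0 (n : Int) 1).filter _).length
          ≤ (PySem.List.pyRange 0 (n : Int) 1).length := List.length_filter_le _ _
        _ = n := by rw [PySem.List.length_pyRange_one]; omega
    have hx1 : 1 ≤ (n + 1) ^ (n - (d + 1)) := Nat.one_le_pow _ _ (by omega)
    have hmul : C.length * (n + 1) ^ (n - (d + 1)) ≤ n * (n + 1) ^ (n - (d + 1)) :=
      Nat.mul_le_mul_right _ hClen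
    have hpow : (n + 1) ^ (n - d) = (n + 1) * (n + 1) ^ (n - (d + 1)) := by
      have : n - d = (n - (d + 1)) + 1 := by omega
      rw [this, pow_succ, mul_comm]
    rw [hpow]
    have hfin : (n + 1) * (n + 1) ^ (n - (d + 1)) = n * (n + 1) ^ (n - (d + 1)) + (n + 1) ^ (n - (d + 1)) :=
      Nat.succ_mul _ _
    calc C.length * (n + 1) ^ (n - (d + 1)) + 1
        ≤ n * (n + 1) ^ (n - (d + 1)) + 1 := Nat.add_le_add_right hmul 1
      _ ≤ n * (n + 1) ^ (n - (d + 1)) + (n + 1) ^ (n - (d + 1)) := Nat.add_le_add_left hx1 _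
      _ = (n + 1) * (n + 1) ^ (n - (d + 1)) := hfin.symm

-- ---- reachability along the children lists ----

inductive pvReach (parent : List Int) : Int → Int → Prop
  | refl (v : Int) : pvReach parent v v
  | step (a b c : Int) : pvReach parent a b → c ∈ PySem.List.pyGetD (pvChildrenA parent) b [] →
      pvReach parent a c

theorem pvReach_trans (parent : List Int) (a b c : Int)
    (h1 : pvReach parent a b) (h2 : pvReach parent b c) : pvReach parent a c := by
  induction h2 with
  | refl => exact h1
  | step y z hxy hm ih => exact pvReach.step a y z ih hm

theorem pvReach_head_decomp (parent : List Int) (v x : Int) :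
    pvReach parent v x ↔ x = v ∨ ∃ c ∈ PySem.List.pyGetD (pvChildrenA parent) v [],
      pvReach parent c x := by
  constructor
  · intro h
    induction h with
    | refl => exact Or.inl rfl
    | step b c hb hm ih =>
      rcases ih with rfl | ⟨c', hc', hr'⟩
      · exact Or.inr ⟨c, hm, pvReach.refl c⟩
      · exact Or.inr ⟨c', hc', pvReach.step c' b c hr' hm⟩
  · rintro (rfl | ⟨c, hm, hr⟩)
    · exact pvReach.refl x
    · exact pvReach_trans parent v c x (pvReach.step v v c (pvReach.refl v) hm) hr

theorem pvReach_valid (parent : List Int)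
    (hP : ∀ k < parent.length, -(parent.length : Int) ≤ parent.getD k 0 ∧ parent.getD k 0 < (parent.length : Int))
    (s x : Int) (h : pvReach parent s x) : x = s ∨ (0 ≤ x ∧ x < (parent.length : Int)) := by
  induction h with
  | refl => exact Or.inl rfl
  | step b c _ hm _ => exact Or.inr (mem_pyGetD_children parent hP b c hm).1

-- ---- what A's DFS collects ----

theorem dfs_mem (parent locked : List Int)
    (hP : ∀ k < parent.length, -(parent.length : Int) ≤ parent.getD k 0 ∧ parent.getD k 0 < (parent.length : Int))
    (hAc : pvAcyclic parent) :
    ∀ (f : Nat) (stack acc : List Int),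
      (∀ s ∈ stack, -(parent.length : Int) ≤ s ∧ s < (parent.length : Int)) →
      (stack.map (fun v => (parent.length + 1) ^ (parent.length - pvDepN parent (pvW parent.length v)))).sum + 1 ≤ f →
      ∀ x, x ∈ pvDfsA (pvChildrenA parent) locked f stack acc ↔
        x ∈ acc ∨ ∃ s ∈ stack, pvReach parent s x ∧ PySem.List.pyGetD locked x 0 ≠ -1 := by
  intro f
  induction f with
  | zero => intro stack acc hs hm x; omega
  | succ f ih =>
    intro stack acc hs hm x
    cases stack with
    | nil => simp [pvDfsA]
    | cons v rest =>
      obtain ⟨hv1, hv2⟩ := hs v List.mem_cons_self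
      simp only [pvDfsA]
      have hCvalid : ∀ c ∈ PySem.List.pyGetD (pvChildrenA parent) v [],
          -(parent.length : Int) ≤ c ∧ c < (parent.length : Int) := by
        intro c hc
        have := (mem_pyGetD_children parent hP v c hc).1
        constructor <;> omega
      have hs' : ∀ s ∈ (PySem.List.pyGetD (pvChildrenA parent) v []).reverse ++ rest,
          -(parent.length : Int) ≤ s ∧ s < (parent.length : Int) := by
        intro s hsm
        rcases List.mem_append.1 hsm with h | h
        · exact hCvalid s (List.mem_reverse.1 h)
        · exact hs s (List.mem_cons_of_mem _ h)
      have hbound := measure_children parent hP hAc v hv1 hv2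
      have hm' : (((PySem.List.pyGetD (pvChildrenA parent) v []).reverse ++ rest).map
          (fun w => (parent.length + 1) ^ (parent.length - pvDepN parent (pvW parent.length w)))).sum + 1 ≤ f := by
        rw [List.map_append, List.sum_append, List.map_reverse, List.sum_reverse]
        simp only [List.map_cons, List.sum_cons] at hm
        omega
      rw [ih ((PySem.List.pyGetD (pvChildrenA parent) v []).reverse ++ rest) _ hs' hm' x]
      have hkey : (pvReach parent v x ∧ PySem.List.pyGetD locked x 0 ≠ -1) ↔
          ((x = v ∧ PySem.List.pyGetD locked v 0 ≠ -1) ∨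
           ∃ c ∈ PySem.List.pyGetD (pvChildrenA parent) v [],
             pvReach parent c x ∧ PySem.List.pyGetD locked x 0 ≠ -1) := by
        constructor
        · rintro ⟨hr, hlx⟩
          rcases (pvReach_head_decomp parent v x).1 hr with rfl | ⟨c, hcC, hrc⟩
          · exact Or.inl ⟨rfl, hlx⟩
          · exact Or.inr ⟨c, hcC, hrc, hlx⟩
        · rintro (⟨rfl, hlv⟩ | ⟨c, hcC, hrc, hlx⟩)
          · exact ⟨pvReach.refl _, hlv⟩
          · exact ⟨(pvReach_head_decomp parent v x).2 (Or.inr ⟨c, hcC, hrc⟩), hlx⟩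
      split_ifs with hlv
      · constructor
        · rintro (hxa | ⟨s, hsm, hP'⟩)
          · rcases List.mem_append.1 hxa with h | h
            · exact Or.inl h
            · refine Or.inr ⟨v, List.mem_cons_self, ?_⟩
              rw [List.mem_singleton] at h
              subst h
              exact hkey.2 (Or.inl ⟨rfl, hlv⟩)
          · rcases List.mem_append.1 hsm with h | h
            · exact Or.inr ⟨v, List.mem_cons_self, hkey.2 (Or.inr ⟨s, List.mem_reverse.1 h, hP'⟩)⟩
            · exact Or.inr ⟨s, List.mem_cons_of_mem _ h, hP'⟩
        · rintro (hxa | ⟨s, hsm, hP'⟩)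
          · exact Or.inl (List.mem_append.2 (Or.inl hxa))
          · rcases List.mem_cons.1 hsm with rfl | h
            · rcases hkey.1 hP' with ⟨rfl, _⟩ | ⟨c, hcC, hPc⟩
              · exact Or.inl (List.mem_append.2 (Or.inr (List.mem_singleton.2 rfl)))
              · exact Or.inr ⟨c, List.mem_append.2 (Or.inl (List.mem_reverse.2 hcC)), hPc⟩
            · exact Or.inr ⟨s, List.mem_append.2 (Or.inr h), hP'⟩
      · constructor
        · rintro (hxa | ⟨s, hsm, hP'⟩)
          · exact Or.inl hxa
          · rcases List.mem_append.1 hsm with h | h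
            · exact Or.inr ⟨v, List.mem_cons_self, hkey.2 (Or.inr ⟨s, List.mem_reverse.1 h, hP'⟩)⟩
            · exact Or.inr ⟨s, List.mem_cons_of_mem _ h, hP'⟩
        · rintro (hxa | ⟨s, hsm, hP'⟩)
          · exact Or.inl hxa
          · rcases List.mem_cons.1 hsm with rfl | h
            · rcases hkey.1 hP' with ⟨_, hbad⟩ | ⟨c, hcC, hPc⟩
              · exact absurd hbad hlv
              · exact Or.inr ⟨c, List.mem_append.2 (Or.inl (List.mem_reverse.2 hcC)), hPc⟩
            · exact Or.inr ⟨s, List.mem_append.2 (Or.inr h), hP'⟩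

-- ---- clearing a set of locks, as a fold ----

theorem clearFold_length : ∀ (L : List Int) (locked : List Int),
    (L.foldl (fun l v => PySem.List.pySetD l v (-1)) locked).length = locked.length := by
  intro L
  induction L with
  | nil => intro locked; rfl
  | cons v t ih => intro locked; simp only [List.foldl_cons]; rw [ih, PySem.List.length_pySetD]

theorem clearFold_getD (n : Nat) (k : Nat) : ∀ (L locked : List Int), locked.length = n →
    (∀ v ∈ L, -(n : Int) ≤ v ∧ v < n) →
    (L.foldl (fun l v => PySem.List.pySetD l v (-1)) locked).getD k 0 =
      if ∃ v ∈ L, pvW n v = k then -1 else locked.getD k 0 := by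
  intro L
  induction L with
  | nil => intro locked _ _; simp
  | cons v t ih =>
    intro locked hn hL
    subst hn
    obtain ⟨h1, h2⟩ := hL v List.mem_cons_self
    simp only [List.foldl_cons]
    rw [pySetD_wrap locked v _ h1 h2]
    rw [ih (locked.set (pvW locked.length v) (-1)) (by simp)
      (fun w hw => hL w (List.mem_cons_of_mem _ hw))]
    rw [getD_set_general _ _ _ _ _ (pvW_lt _ _ h1 h2)]
    by_cases hex : ∃ w ∈ t, pvW locked.length w = k
    · rw [if_pos hex, if_pos ⟨hex.choose, List.mem_cons_of_mem _ hex.choose_spec.1, hex.choose_spec.2⟩]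
    · rw [if_neg hex]
      by_cases hvk : pvW locked.length v = k
      · rw [if_pos hvk, if_pos ⟨v, List.mem_cons_self, hvk⟩]
      · rw [if_neg hvk, if_neg (by
          rintro ⟨w, hw, hwk⟩
          rcases List.mem_cons.1 hw with rfl | hw'
          · exact hvk hwk
          · exact hex ⟨w, hw', hwk⟩)]

-- peel the head of the worklist: its reach set is itself plus everything reached from its children
theorem reach_cons_iff (parent : List Int) (v : Int) (rest : List Int) (Q : Int → Prop) :
    (∃ s ∈ v :: rest, ∃ x, pvReach parent s x ∧ Q x) ↔
    (Q v ∨ ∃ s ∈ rest ++ PySem.List.pyGetD (pvChildrenA parent) v [], ∃ x, pvReach parent s x ∧ Q x) := by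
  constructor
  · rintro ⟨s, hs, x, hr, hq⟩
    rcases List.mem_cons.1 hs with rfl | hs'
    · rcases (pvReach_head_decomp parent s x).1 hr with rfl | ⟨c, hcC, hrc⟩
      · exact Or.inl hq
      · exact Or.inr ⟨c, List.mem_append.2 (Or.inr hcC), x, hrc, hq⟩
    · exact Or.inr ⟨s, List.mem_append.2 (Or.inl hs'), x, hr, hq⟩
  · rintro (hq | ⟨s, hs, x, hr, hq⟩)
    · exact ⟨v, List.mem_cons_self, v, pvReach.refl v, hq⟩
    · rcases List.mem_append.1 hs with h | h
      · exact ⟨s, List.mem_cons_of_mem _ h, x, hr, hq⟩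
      · exact ⟨v, List.mem_cons_self, x,
          (pvReach_head_decomp parent v x).2 (Or.inr ⟨s, h, hr⟩), hq⟩

-- ---- what B's fused sweep computes ----

theorem bfs_spec (parent : List Int)
    (hP : ∀ k < parent.length, -(parent.length : Int) ≤ parent.getD k 0 ∧ parent.getD k 0 < (parent.length : Int))
    (hAc : pvAcyclic parent) :
    ∀ (f : Nat) (pending locked : List Int) (cleared : Bool),
      locked.length = parent.length →
      (∀ s ∈ pending, -(parent.length : Int) ≤ s ∧ s < (parent.length : Int)) →
      (pending.map (fun v => (parent.length + 1) ^ (parent.length - pvDepN parent (pvW parent.length v)))).sum + 1 ≤ f →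
      ((pvBfsB (pvChildrenA parent) f pending locked cleared).1 = true ↔
        (cleared = true ∨ ∃ s ∈ pending, ∃ x, pvReach parent s x ∧ PySem.List.pyGetD locked x 0 ≠ -1)) ∧
      (pvBfsB (pvChildrenA parent) f pending locked cleared).2.length = parent.length ∧
      (∀ k < parent.length,
        ((∃ s ∈ pending, ∃ x, pvReach parent s x ∧ pvW parent.length x = k) ∧ locked.getD k 0 ≠ -1 →
          (pvBfsB (pvChildrenA parent) f pending locked cleared).2.getD k 0 = -1) ∧
        (¬ ((∃ s ∈ pending, ∃ x, pvReach parent s x ∧ pvW parent.length x = k) ∧ locked.getD k 0 ≠ -1) →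
          (pvBfsB (pvChildrenA parent) f pending locked cleared).2.getD k 0 = locked.getD k 0)) := by
  intro f
  induction f with
  | zero => intro pending locked cleared _ _ hm; omega
  | succ f ih =>
    intro pending locked cleared hlen hval hm
    cases pending with
    | nil =>
      refine ⟨by simp [pvBfsB], hlen, fun k hk => ⟨?_, fun _ => rfl⟩⟩
      rintro ⟨⟨s, hs, _⟩, _⟩
      cases hs
    | cons v rest =>
      obtain ⟨hv1, hv2⟩ := hval v List.mem_cons_self
      have e1 : PySem.List.pyGetD locked v 0 = locked.getD (pvW parent.length v) 0 := by
        rw [pyGetD_wrap locked v 0 (by rw [hlen]; exact hv1) (by rw [hlen]; exact hv2), hlen]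
      have hwv : pvW parent.length v < parent.length := pvW_lt _ _ hv1 (by exact_mod_cast hv2)
      have hval' : ∀ s ∈ rest ++ PySem.List.pyGetD (pvChildrenA parent) v [],
          -(parent.length : Int) ≤ s ∧ s < (parent.length : Int) := by
        intro s hsm
        rcases List.mem_append.1 hsm with h | h
        · exact hval s (List.mem_cons_of_mem _ h)
        · have := (mem_pyGetD_children parent hP v s h).1
          constructor <;> omega
      have hm' : ((rest ++ PySem.List.pyGetD (pvChildrenA parent) v []).map
          (fun w => (parent.length + 1) ^ (parent.length - pvDepN parent (pvW parent.length w)))).sum + 1 ≤ f := by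
        rw [List.map_append, List.sum_append]
        have hbound := measure_children parent hP hAc v hv1 hv2
        simp only [List.map_cons, List.sum_cons] at hm
        omega
      simp only [pvBfsB]
      split_ifs with hlv
      · -- the head holds a lock: clear it, cleared := true
        have hset : PySem.List.pySetD locked v (-1) = locked.set (pvW parent.length v) (-1) := by
          rw [pySetD_wrap locked v _ (by rw [hlen]; exact hv1) (by rw [hlen]; exact hv2), hlen]
        rw [hset]
        obtain ⟨ihb, ihl, ihk⟩ := ih (rest ++ PySem.List.pyGetD (pvChildrenA parent) v [])
          (locked.set (pvW parent.length v) (-1)) true (by simp [hlen]) hval' hm'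
        have hgetD1 : ∀ k, (locked.set (pvW parent.length v) (-1)).getD k 0 =
            if pvW parent.length v = k then -1 else locked.getD k 0 := by
          intro k
          exact getD_set_general _ _ _ _ _ (by rw [hlen]; exact hwv)
        refine ⟨?_, ihl, fun k hk => ⟨?_, ?_⟩⟩
        · constructor
          · intro _
            exact Or.inr ⟨v, List.mem_cons_self, v, pvReach.refl v, hlv⟩
          · intro _
            exact ihb.2 (Or.inl rfl)
        · -- inside the cleared set
          intro hcond
          obtain ⟨ihk1, ihk2⟩ := ihk k hk
          by_cases hc' : (∃ s ∈ rest ++ PySem.List.pyGetD (pvChildrenA parent) v [],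
              ∃ x, pvReach parent s x ∧ pvW parent.length x = k) ∧
              (locked.set (pvW parent.length v) (-1)).getD k 0 ≠ -1
          · exact ihk1 hc'
          · rw [ihk2 hc', hgetD1 k]
            by_cases hkv : pvW parent.length v = k
            · rw [if_pos hkv]
            · rw [if_neg hkv]
              -- then the condition transfers to the tail, contradiction with hc'
              exfalso
              apply hc'
              obtain ⟨hex, hlk⟩ := hcond
              rcases (reach_cons_iff parent v rest (fun x => pvW parent.length x = k)).1 hex with h | h
              · exact absurd h hkv
              · exact ⟨h, by rw [hgetD1 k, if_neg hkv]; exact hlk⟩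
        · -- outside the cleared set
          intro hcond
          obtain ⟨ihk1, ihk2⟩ := ihk k hk
          by_cases hkv : pvW parent.length v = k
          · -- k is the head's slot: it IS cleared whenever it held a lock — but then hcond fails
            exfalso
            apply hcond
            refine ⟨⟨v, List.mem_cons_self, v, pvReach.refl v, hkv⟩, ?_⟩
            rw [← hkv, ← e1]
            exact hlv
          · have : ¬ ((∃ s ∈ rest ++ PySem.List.pyGetD (pvChildrenA parent) v [],
                ∃ x, pvReach parent s x ∧ pvW parent.length x = k) ∧
                (locked.set (pvW parent.length v) (-1)).getD k 0 ≠ -1) := by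
              rintro ⟨hex, hlk⟩
              apply hcond
              rw [hgetD1 k, if_neg hkv] at hlk
              exact ⟨(reach_cons_iff parent v rest (fun x => pvW parent.length x = k)).2 (Or.inr hex), hlk⟩
            rw [ihk2 this, hgetD1 k, if_neg hkv]
      · -- the head is unlocked: nothing changes
        obtain ⟨ihb, ihl, ihk⟩ := ih (rest ++ PySem.List.pyGetD (pvChildrenA parent) v [])
          locked cleared hlen hval' hm'
        have hlkv : locked.getD (pvW parent.length v) 0 = -1 := by
          rw [← e1]
          by_contra h
          exact hlv h
        refine ⟨?_, ihl, fun k hk => ⟨?_, ?_⟩⟩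
        · rw [ihb]
          constructor
          · rintro (h | h)
            · exact Or.inl h
            · exact Or.inr ((reach_cons_iff parent v rest
                (fun x => PySem.List.pyGetD locked x 0 ≠ -1)).2 (Or.inr h))
          · rintro (h | h)
            · exact Or.inl h
            · rcases (reach_cons_iff parent v rest
                (fun x => PySem.List.pyGetD locked x 0 ≠ -1)).1 h with h' | h'
              · exact absurd h' (by simpa using hlv)
              · exact Or.inr h'
        · intro hcond
          obtain ⟨hex, hlk⟩ := hcond
          refine (ihk k hk).1 ⟨?_, hlk⟩
          rcases (reach_cons_iff parent v rest (fun x => pvW parent.length x = k)).1 hex with h | h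
          · exfalso
            rw [← h] at hlk
            exact hlk hlkv
          · exact h
        · intro hcond
          refine (ihk k hk).2 ?_
          rintro ⟨hex, hlk⟩
          exact hcond ⟨(reach_cons_iff parent v rest
            (fun x => pvW parent.length x = k)).2 (Or.inr hex), hlk⟩

-- ---- the upgrade computations agree ----

-- pvUpgradeB is not a definition of B's port (B inlines upgrade in the driver); it is
-- introduced here only to phrase the branch equality once.
def pvUpgradeB (parent : List Int) (children : List (List Int)) (locked : List Int) (num user : Int) : Bool × List Int :=
  if PySem.List.pyGetD locked num 0 ≠ -1 then (false, locked)
  else if pvWalkA parent locked (parent.length + 2) num then (false, locked)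
  else
    let r := pvBfsB children ((parent.length + 1) ^ (parent.length + 1) + 1) [num] locked false
    if r.1 then (true, PySem.List.pySetD r.2 num user) else (false, r.2)

theorem upgradeA_parts (parent locked : List Int)
    (hP : ∀ k < parent.length, -(parent.length : Int) ≤ parent.getD k 0 ∧ parent.getD k 0 < (parent.length : Int))
    (hAc : pvAcyclic parent) (hlen : locked.length = parent.length)
    (num user : Int) (h1 : -(parent.length : Int) ≤ num) (h2 : num < (parent.length : Int)) :
    pvUpgradeA parent (pvChildrenA parent) locked num user =
      pvUpgradeB parent (pvChildrenA parent) locked num user := by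
  unfold pvUpgradeA pvUpgradeB
  by_cases hl : PySem.List.pyGetD locked num 0 ≠ -1
  · rw [if_pos hl, if_pos hl]
  · rw [if_neg hl, if_neg hl]
    by_cases hw : pvWalkA parent locked (parent.length + 2) num = true
    · rw [if_pos hw, if_pos hw]
    · rw [if_neg hw, if_neg hw]
      simp only
      -- valid nodes reached from num
      have hvx : ∀ x, pvReach parent num x → (-(parent.length : Int) ≤ x ∧ x < (parent.length : Int)) := by
        intro x hr
        rcases pvReach_valid parent hP num x hr with rfl | ⟨a, b⟩
        · exact ⟨h1, h2⟩
        · exact ⟨by omega, b⟩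
      have hlkeq : ∀ x, pvReach parent num x →
          PySem.List.pyGetD locked x 0 = locked.getD (pvW parent.length x) 0 := by
        intro x hr
        obtain ⟨a, b⟩ := hvx x hr
        rw [pyGetD_wrap locked x 0 (by rw [hlen]; exact a) (by rw [hlen]; exact b), hlen]
      -- A's DFS
      have hmemA : ∀ x, x ∈ pvDfsA (pvChildrenA parent) locked
          ((parent.length + 1) ^ (parent.length + 1) + 1) [num] [] ↔
          (pvReach parent num x ∧ PySem.List.pyGetD locked x 0 ≠ -1) := by
        intro x
        rw [dfs_mem parent locked hP hAc _ [num] []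
          (by intro s hs; rw [List.mem_singleton] at hs; subst hs; exact ⟨h1, h2⟩)
          (by
            simp only [List.map_cons, List.map_nil, List.sum_cons, List.sum_nil]
            have : (parent.length + 1) ^ (parent.length - pvDepN parent (pvW parent.length num)) ≤
                (parent.length + 1) ^ (parent.length + 1) :=
              Nat.pow_le_pow_right (by omega) (by omega)
            omega)]
        simp
      -- B's sweep
      obtain ⟨hb, hl2, hk⟩ := bfs_spec parent hP hAc
        ((parent.length + 1) ^ (parent.length + 1) + 1) [num] locked false hlen
        (by intro s hs; rw [List.mem_singleton] at hs; subst hs; exact ⟨h1, h2⟩)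
        (by
          simp only [List.map_cons, List.map_nil, List.sum_cons, List.sum_nil]
          have : (parent.length + 1) ^ (parent.length - pvDepN parent (pvW parent.length num)) ≤
              (parent.length + 1) ^ (parent.length + 1) :=
            Nat.pow_le_pow_right (by omega) (by omega)
          omega)
      have hbE : (pvBfsB (pvChildrenA parent) ((parent.length + 1) ^ (parent.length + 1) + 1)
          [num] locked false).1 = true ↔
          ∃ x, pvReach parent num x ∧ PySem.List.pyGetD locked x 0 ≠ -1 := by
        rw [hb]
        simp
      by_cases hE : ∃ x, pvReach parent num x ∧ PySem.List.pyGetD locked x 0 ≠ -1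
      · -- some locked descendant exists: both lock num for user
        obtain ⟨x0, hx0r, hx0l⟩ := hE
        have hfoundne : pvDfsA (pvChildrenA parent) locked
            ((parent.length + 1) ^ (parent.length + 1) + 1) [num] [] ≠ [] :=
          List.ne_nil_of_mem ((hmemA x0).2 ⟨hx0r, hx0l⟩)
        rw [if_neg hfoundne, if_pos (hbE.2 ⟨x0, hx0r, hx0l⟩)]
        -- the two cleared lock lists agree
        have hclear : (pvDfsA (pvChildrenA parent) locked
              ((parent.length + 1) ^ (parent.length + 1) + 1) [num] []).foldl
              (fun l nd => PySem.List.pySetD l nd (-1)) locked =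
            (pvBfsB (pvChildrenA parent) ((parent.length + 1) ^ (parent.length + 1) + 1)
              [num] locked false).2 := by
          apply List.ext_getElem (by rw [clearFold_length, hlen, hl2])
          intro i hif his
          have hi : i < parent.length := by rwa [hl2] at his
          rw [← List.getD_eq_getElem _ 0 hif, ← List.getD_eq_getElem _ 0 his]
          rw [clearFold_getD parent.length i _ locked hlen
            (fun v hv => hvx v ((hmemA v).1 hv).1)]
          have hiff : (∃ v ∈ pvDfsA (pvChildrenA parent) locked
                ((parent.length + 1) ^ (parent.length + 1) + 1) [num] [],
                pvW parent.length v = i) ↔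
              ((∃ s ∈ [num], ∃ x, pvReach parent s x ∧ pvW parent.length x = i) ∧
                locked.getD i 0 ≠ -1) := by
            constructor
            · rintro ⟨v, hv, hvw⟩
              obtain ⟨hvr, hvl⟩ := (hmemA v).1 hv
              refine ⟨⟨num, List.mem_singleton.2 rfl, v, hvr, hvw⟩, ?_⟩
              rw [← hvw, ← hlkeq v hvr]
              exact hvl
            · rintro ⟨⟨s, hs, x, hxr, hxw⟩, hil⟩
              rw [List.mem_singleton] at hs
              subst hs
              refine ⟨x, (hmemA x).2 ⟨hxr, ?_⟩, hxw⟩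
              rw [hlkeq x hxr, hxw]
              exact hil
          obtain ⟨hk1, hk2⟩ := hk i hi
          by_cases hc : (∃ s ∈ [num], ∃ x, pvReach parent s x ∧ pvW parent.length x = i) ∧
              locked.getD i 0 ≠ -1
          · rw [if_pos (hiff.2 hc), hk1 hc]
          · rw [if_neg (fun h => hc (hiff.1 h)), hk2 hc]
        rw [hclear]
      · -- no locked descendant: both leave the state unchanged and answer False
        have hfound : pvDfsA (pvChildrenA parent) locked
            ((parent.length + 1) ^ (parent.length + 1) + 1) [num] [] = [] := by
          rw [List.eq_nil_iff_forall_not_mem]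
          intro x hx
          exact hE ⟨x, (hmemA x).1 hx⟩
        have hbf : (pvBfsB (pvChildrenA parent) ((parent.length + 1) ^ (parent.length + 1) + 1)
            [num] locked false).1 = false := by
          by_contra h
          exact hE (hbE.1 (by revert h; cases (pvBfsB (pvChildrenA parent)
            ((parent.length + 1) ^ (parent.length + 1) + 1) [num] locked false).1 <;> simp))
        rw [if_pos hfound, if_neg (by rw [hbf]; simp)]
        have hsame : (pvBfsB (pvChildrenA parent) ((parent.length + 1) ^ (parent.length + 1) + 1)
            [num] locked false).2 = locked := by
          apply List.ext_getElem (by rw [hl2, hlen])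
          intro i his hil
          have hi : i < parent.length := by rwa [hl2] at his
          rw [← List.getD_eq_getElem _ 0 his, ← List.getD_eq_getElem _ 0 hil]
          refine (hk i hi).2 ?_
          rintro ⟨⟨s, hs, x, hxr, hxw⟩, hil'⟩
          rw [List.mem_singleton] at hs
          subst hs
          apply hE
          refine ⟨x, hxr, ?_⟩
          rw [hlkeq x hxr, hxw]
          exact hil'
        rw [hsame]

theorem pvBfsB_length (children : List (List Int)) : ∀ (f : Nat) (pending locked : List Int) (cleared : Bool),
    (pvBfsB children f pending locked cleared).2.length = locked.length := by
  intro f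
  induction f with
  | zero => intro pending locked cleared; rfl
  | succ f ih =>
    intro pending locked cleared
    cases pending with
    | nil => rfl
    | cons v rest =>
      simp only [pvBfsB]
      split
      · rw [ih, PySem.List.length_pySetD]
      · rw [ih]

-- ---- the drivers agree ----

theorem pvLoop_eq (parent : List Int) (ops : List String) (args : List (List Int))
    (hpre : Pre_run_operations parent ops args) :
    ∀ (m k : Nat), ops.length ≤ k + m →
    ∀ (st : Option (List (List Int) × List Int)) (res : List (Option Bool)),
    ((st = none ∧ ∀ j < k, ops.getD j "" ≠ "LockingTree") ∨
     (∃ l, l.length = parent.length ∧ st = some (pvChildrenA parent, l) ∧ "LockingTree" ∈ ops)) →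
    pvLoopA parent args (PySem.List.enumerate (ops.drop k) (k : Int)) st res =
    pvLoopB parent args (PySem.List.enumerate (ops.drop k) (k : Int)) st res := by
  intro m
  induction m with
  | zero =>
    intro k hk st res hinv
    rw [List.drop_eq_nil_of_le (by omega), PySem.List.enumerate_nil]
    rfl
  | succ m ih =>
    intro k hk st res hinv
    by_cases hklt : k < ops.length
    · rw [List.drop_eq_getElem_cons hklt, PySem.List.enumerate_cons]
      have hcast : (k : Int) + 1 = ((k + 1 : Nat) : Int) := by push_cast; ring
      rw [hcast]
      have hgetD : ops.getD k "" = ops[k] := List.getD_eq_getElem ops "" hklt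
      simp only [pvLoopA, pvLoopB]
      by_cases h1 : ops[k] = "LockingTree"
      · rw [if_pos h1, if_pos h1]
        exact ih (k + 1) (by omega) _ _
          (Or.inr ⟨List.replicate parent.length (-1), by simp, rfl,
            h1 ▸ List.getElem_mem hklt⟩)
      · rw [if_neg h1, if_neg h1]
        have hstate : (ops.getD k "" = "lock" ∨ ops.getD k "" = "unlock" ∨ ops.getD k "" = "upgrade") →
            ∃ l, l.length = parent.length ∧ st = some (pvChildrenA parent, l) ∧
              "LockingTree" ∈ ops := by
          intro hop
          obtain ⟨⟨j, hj, hjL⟩, _⟩ := hpre.2.2 k hklt hop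
          rcases hinv with ⟨_, hnone⟩ | h
          · exact absurd hjL (hnone j hj)
          · exact h
        by_cases h2 : ops[k] = "lock"
        · obtain ⟨l, hll, hst, hmem⟩ := hstate (Or.inl (hgetD.trans h2))
          subst hst
          rw [if_pos h2, if_pos h2]
          simp only [Option.getD_some]
          by_cases hc : PySem.List.pyGetD l (PySem.List.pyGetD (PySem.List.pyGetD args (k : Int) []) 0 0) 0 ≠ -1
          · have hr : pvLockA l (PySem.List.pyGetD (PySem.List.pyGetD args (k : Int) []) 0 0)
                (PySem.List.pyGetD (PySem.List.pyGetD args (k : Int) []) 1 0) =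
                (false, l) := by unfold pvLockA; rw [if_pos hc]
            rw [hr, if_pos hc]
            exact ih (k + 1) (by omega) _ _ (Or.inr ⟨l, hll, rfl, hmem⟩)
          · have hr : pvLockA l (PySem.List.pyGetD (PySem.List.pyGetD args (k : Int) []) 0 0)
                (PySem.List.pyGetD (PySem.List.pyGetD args (k : Int) []) 1 0) =
                (true, PySem.List.pySetD l (PySem.List.pyGetD (PySem.List.pyGetD args (k : Int) []) 0 0)
                  (PySem.List.pyGetD (PySem.List.pyGetD args (k : Int) []) 1 0)) := by
              unfold pvLockA; rw [if_neg hc]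
            rw [hr, if_neg hc]
            exact ih (k + 1) (by omega) _ _
              (Or.inr ⟨_, by rw [PySem.List.length_pySetD]; exact hll, rfl, hmem⟩)
        · rw [if_neg h2, if_neg h2]
          by_cases h3 : ops[k] = "unlock"
          · obtain ⟨l, hll, hst, hmem⟩ := hstate (Or.inr (Or.inl (hgetD.trans h3)))
            subst hst
            rw [if_pos h3, if_pos h3]
            simp only [Option.getD_some]
            by_cases hc : PySem.List.pyGetD l (PySem.List.pyGetD (PySem.List.pyGetD args (k : Int) []) 0 0) 0 ≠
                PySem.List.pyGetD (PySem.List.pyGetD args (k : Int) []) 1 0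
            · have hr : pvUnlockA l (PySem.List.pyGetD (PySem.List.pyGetD args (k : Int) []) 0 0)
                  (PySem.List.pyGetD (PySem.List.pyGetD args (k : Int) []) 1 0) =
                  (false, l) := by unfold pvUnlockA; rw [if_pos hc]
              rw [hr, if_pos hc]
              exact ih (k + 1) (by omega) _ _ (Or.inr ⟨l, hll, rfl, hmem⟩)
            · have hr : pvUnlockA l (PySem.List.pyGetD (PySem.List.pyGetD args (k : Int) []) 0 0)
                  (PySem.List.pyGetD (PySem.List.pyGetD args (k : Int) []) 1 0) =
                  (true, PySem.List.pySetD l (PySem.List.pyGetD (PySem.List.pyGetD args (k : Int) []) 0 0) (-1)) := by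
                unfold pvUnlockA; rw [if_neg hc]
              rw [hr, if_neg hc]
              exact ih (k + 1) (by omega) _ _
                (Or.inr ⟨_, by rw [PySem.List.length_pySetD]; exact hll, rfl, hmem⟩)
          · rw [if_neg h3, if_neg h3]
            by_cases h4 : ops[k] = "upgrade"
            · obtain ⟨l, hll, hst, hmem⟩ := hstate (Or.inr (Or.inr (hgetD.trans h4)))
              subst hst
              obtain ⟨_, hargs, hlen2, hnum0, hnumlt⟩ :=
                hpre.2.2 k hklt (Or.inr (Or.inr (hgetD.trans h4)))
              rw [if_pos h4, if_pos h4]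
              simp only [Option.getD_some]
              have hnumeq : PySem.List.pyGetD (PySem.List.pyGetD args (k : Int) []) 0 0 =
                  (args.getD k []).getD 0 0 := by
                rw [PySem.List.pyGetD_natCast, PySem.List.pyGetD_zero]
              have hAcyc : pvAcyclic parent := hpre.2.1 ⟨k, hklt, hgetD.trans h4⟩
              have hP := hpre.1 hmem
              have hupg := upgradeA_parts parent l hP hAcyc hll
                (PySem.List.pyGetD (PySem.List.pyGetD args (k : Int) []) 0 0)
                (PySem.List.pyGetD (PySem.List.pyGetD args (k : Int) []) 1 0)
                (by rw [hnumeq]; exact hnum0) (by rw [hnumeq]; exact hnumlt)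
              rw [hupg]
              unfold pvUpgradeB
              by_cases hcl : PySem.List.pyGetD l (PySem.List.pyGetD (PySem.List.pyGetD args (k : Int) []) 0 0) 0 ≠ -1
              · rw [if_pos hcl, if_pos hcl]
                exact ih (k + 1) (by omega) _ _ (Or.inr ⟨l, hll, rfl, hmem⟩)
              · rw [if_neg hcl, if_neg hcl]
                by_cases hwk : pvWalkA parent l (parent.length + 2)
                    (PySem.List.pyGetD (PySem.List.pyGetD args (k : Int) []) 0 0) = true
                · rw [if_pos hwk, if_pos hwk]
                  exact ih (k + 1) (by omega) _ _ (Or.inr ⟨l, hll, rfl, hmem⟩)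
                · rw [if_neg hwk, if_neg hwk]
                  simp only
                  by_cases hr1 : (pvBfsB (pvChildrenA parent)
                      ((parent.length + 1) ^ (parent.length + 1) + 1)
                      [PySem.List.pyGetD (PySem.List.pyGetD args (k : Int) []) 0 0] l false).1 = true
                  · rw [if_pos hr1, if_pos hr1]
                    exact ih (k + 1) (by omega) _ _
                      (Or.inr ⟨_, by rw [PySem.List.length_pySetD, pvBfsB_length]; exact hll, rfl, hmem⟩)
                  · rw [if_neg hr1, if_neg hr1]
                    exact ih (k + 1) (by omega) _ _
                      (Or.inr ⟨_, by rw [pvBfsB_length]; exact hll, rfl, hmem⟩)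
            · rw [if_neg h4, if_neg h4]
              refine ih (k + 1) (by omega) _ _ ?_
              rcases hinv with ⟨ha, hnone⟩ | h
              · refine Or.inl ⟨ha, fun j hj => ?_⟩
                by_cases hjk : j < k
                · exact hnone j hjk
                · have hjeq : j = k := by omega
                  subst hjeq
                  rw [hgetD]
                  exact h1
              · exact Or.inr h
    · rw [List.drop_eq_nil_of_le (by omega), PySem.List.enumerate_nil]
      rfl

-- ===== VERDICT (by name: the statement is the Claim_ definition above) =====
theorem run_operations_spec : Claim_equal_run_operations := by
  intro parent ops args _hdom hpre
  unfold Spec_run_operations run_operations run_operations_alt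
  have h := pvLoop_eq parent ops args hpre ops.length 0 (by omega) none []
    (Or.inl ⟨rfl, by omega⟩)
  simpa using h
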